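-- pv_equiv track=rewrite | github.com/rsboggs/bradfield_algos | solutions/pangram.py | is_pangram_1
-- ===== SOURCE A (Python) =====
-- def is_pangram_1(text):
--   if len(text) < 26:
--     return False
--
--   chars = list(text)
--   chars.sort()
--   start_index = 97
--   end_index = start_index + 25
--   final_char = "z"
--
--   current_index = start_index
--   next_index = start_index + 1
--
--   for char in chars:
--     if char == chr(current_index):
--       continue
--     elif char == final_char:
--       return True
--     elif char == chr(next_index):
--       current_index += 1
--       next_index += 1
--     elif ord(char) < start_index or ord(char) > end_index:
--       pass
--     else:
--       return False
--
--   return current_index == end_index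
-- ===== SOURCE B (Python) =====
-- def is_pangram_1(text):
--     seen = set(text)
--     return all(c in seen for c in "abcdefghijklmnopqrstuvwxyz")
-- ===== Notes on version B (the rewrite author's own statement) =====
-- stated objective: faster
-- what changed: B replaces A's sort-then-stateful-scan with a single pass that builds the set of characters and checks that all 26 lowercase letters are present.
-- intended difference: On texts of length at least 26 whose lowercase letters include z, miss at least one other letter, and where every present letter from c through y also has its alphabetic predecessor present (for example a text of 26 copies of the letter z), A returns True although the text is not a pangram; B returns False, the intended answer for a pangram check. — e.g. on is_pangram_1("zzzzzzzzzzzzzzzzzzzzzzzzzz"): A returns true, B returns false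
import Mathlib
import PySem

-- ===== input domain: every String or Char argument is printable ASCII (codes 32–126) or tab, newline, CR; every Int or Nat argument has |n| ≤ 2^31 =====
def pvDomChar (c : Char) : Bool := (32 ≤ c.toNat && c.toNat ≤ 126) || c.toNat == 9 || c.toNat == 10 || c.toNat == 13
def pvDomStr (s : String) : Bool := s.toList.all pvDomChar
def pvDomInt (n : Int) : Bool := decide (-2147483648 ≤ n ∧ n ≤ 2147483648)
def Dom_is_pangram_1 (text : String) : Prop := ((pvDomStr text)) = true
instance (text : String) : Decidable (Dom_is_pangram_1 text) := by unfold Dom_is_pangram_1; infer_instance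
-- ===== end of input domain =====

-- B is a single-pass set check ("all 26 letters present") replacing A's sort-and-scan; on the D_ inputs
-- below A wrongly returns True for non-pangrams and B returns the intended False.

-- ===== PORT A =====
-- the 'for char in chars' loop with its early returns; current_index/next_index (always in 97..122) are kept as Nat
def pyPangramLoop : List Char → Nat → Nat → Bool
  | [], cur, _nxt => decide (cur = 97 + 25)
  | c :: rest, cur, nxt =>
    if c = Char.ofNat cur then pyPangramLoop rest cur nxt
    else if c = 'z' then true
    else if c = Char.ofNat nxt then pyPangramLoop rest (cur + 1) (nxt + 1)
    else if c.toNat < 97 ∨ 97 + 25 < c.toNat then pyPangramLoop rest cur nxt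
    else false

def is_pangram_1 (text : String) : Bool :=
  if PySem.Str.len text < 26 then false
  else pyPangramLoop (PySem.List.sorted text.toList (fun c => c) false) 97 98

-- ===== PORT B =====
def is_pangram_1_alt (text : String) : Bool :=
  let seen := PySem.Set.ofList text.toList
  "abcdefghijklmnopqrstuvwxyz".toList.all (fun c => PySem.Set.contains seen c)

-- ===== PRECONDITION & SPEC =====
-- On texts of length at least 26 whose lowercase letters include z, miss at least one other letter, and where
-- every present letter from c through y also has its alphabetic predecessor present, A returns True although
-- the text is not a pangram; B returns False, the intended answer for a pangram check.
def D_is_pangram_1 (text : String) : Prop :=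
  26 ≤ text.toList.length ∧ 'z' ∈ text.toList ∧
  (∀ c ∈ text.toList, 99 ≤ c.toNat → c.toNat ≤ 121 → Char.ofNat (c.toNat - 1) ∈ text.toList) ∧
  ¬ (∀ c ∈ "abcdefghijklmnopqrstuvwxy".toList, c ∈ text.toList)
instance (text : String) : Decidable (D_is_pangram_1 text) := by unfold D_is_pangram_1; infer_instance

def Spec_is_pangram_1 (text : String) (out : Bool) : Prop := ¬ D_is_pangram_1 text → out = is_pangram_1_alt text
instance (text : String) (out : Bool) : Decidable (Spec_is_pangram_1 text out) := by unfold Spec_is_pangram_1; infer_instance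

def pvDiffWitness_is_pangram_1 : String := "zzzzzzzzzzzzzzzzzzzzzzzzzz"
def pvDiffWitnessOut_is_pangram_1 : Bool × Bool := (true, false)

-- ===== CLAIM (what is proved, stated in full; the proofs are below) =====
def Claim_unchanged_is_pangram_1 : Prop := ∀ (text : String), Dom_is_pangram_1 text → Spec_is_pangram_1 text (is_pangram_1 text)
def Claim_changed_is_pangram_1 : Prop := Dom_is_pangram_1 (pvDiffWitness_is_pangram_1) ∧ D_is_pangram_1 (pvDiffWitness_is_pangram_1) ∧ is_pangram_1 (pvDiffWitness_is_pangram_1) = pvDiffWitnessOut_is_pangram_1.1 ∧ is_pangram_1_alt (pvDiffWitness_is_pangram_1) = pvDiffWitnessOut_is_pangram_1.2 ∧ pvDiffWitnessOut_is_pangram_1.1 ≠ pvDiffWitnessOut_is_pangram_1.2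
def Claim_exact_is_pangram_1 : Prop := ∀ (text : String), Dom_is_pangram_1 text → D_is_pangram_1 text → is_pangram_1 text ≠ is_pangram_1_alt text

-- ===== LEMMAS AND PROOFS =====

lemma char_eq_of_toNat_eq {c d : Char} (h : c.toNat = d.toNat) : c = d :=
  Char.ext (UInt32.toNat_inj.mp h)

lemma toNat_ofNat_small {n : Nat} (h : n < 55296) : (Char.ofNat n).toNat = n := by
  simp [Char.ofNat, Char.toNat, Nat.isValidChar, h, Char.ofNatAux]

lemma toNat_z : ('z' : Char).toNat = 122 := by decide

-- the chain invariant the scan maintains: every letter two or more past `cur` has its predecessor present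
def chainP (L : List Char) (cur : Nat) : Prop :=
  ∀ e ∈ L, cur + 2 ≤ e.toNat → e.toNat ≤ 121 → ∃ d ∈ L, d.toNat + 1 = e.toNat

lemma chain_cons_skip {c : Char} {rest : List Char} {cur : Nat}
    (h97 : 97 ≤ cur) (h121 : cur ≤ 121)
    (hnot : ¬ (97 ≤ c.toNat ∧ cur + 1 ≤ c.toNat ∧ c.toNat ≤ 122)) :
    (('z' ∈ c :: rest ∧ chainP (c :: rest) cur) ↔ ('z' ∈ rest ∧ chainP rest cur)) := by
  have hcz : c ≠ 'z' := by
    intro h; subst h; rw [toNat_z] at hnot; omega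
  constructor
  · rintro ⟨hz, hch⟩
    refine ⟨by rcases List.mem_cons.mp hz with h | h; exact absurd h.symm hcz; exact h, ?_⟩
    intro e he h1 h2
    obtain ⟨d, hd, hde⟩ := hch e (List.mem_cons_of_mem _ he) h1 h2
    rcases List.mem_cons.mp hd with h | h
    · exfalso; subst h; omega
    · exact ⟨d, h, hde⟩
  · rintro ⟨hz, hch⟩
    refine ⟨List.mem_cons_of_mem _ hz, ?_⟩
    intro e he h1 h2
    rcases List.mem_cons.mp he with h | h
    · exfalso; subst h; omega
    · obtain ⟨d, hd, hde⟩ := hch e h h1 h2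
      exact ⟨d, List.mem_cons_of_mem _ hd, hde⟩

lemma chain_cons_adv {c : Char} {rest : List Char} {cur : Nat}
    (h97 : 97 ≤ cur)
    (hc : c.toNat = cur + 1) (hle : cur + 1 ≤ 121) :
    (('z' ∈ c :: rest ∧ chainP (c :: rest) cur) ↔ ('z' ∈ rest ∧ chainP rest (cur + 1))) := by
  have hcz : c ≠ 'z' := by intro h; subst h; rw [toNat_z] at hc; omega
  constructor
  · rintro ⟨hz, hch⟩
    refine ⟨by rcases List.mem_cons.mp hz with h | h; exact absurd h.symm hcz; exact h, ?_⟩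
    intro e he h1 h2
    obtain ⟨d, hd, hde⟩ := hch e (List.mem_cons_of_mem _ he) (by omega) h2
    rcases List.mem_cons.mp hd with h | h
    · exfalso; subst h; omega
    · exact ⟨d, h, hde⟩
  · rintro ⟨hz, hch⟩
    refine ⟨List.mem_cons_of_mem _ hz, ?_⟩
    intro e he h1 h2
    rcases List.mem_cons.mp he with h | h
    · exfalso; subst h; omega
    · by_cases he2 : e.toNat = cur + 2
      · exact ⟨c, List.mem_cons_self, by omega⟩
      · obtain ⟨d, hd, hde⟩ := hch e h (by omega) h2
        exact ⟨d, List.mem_cons_of_mem _ hd, hde⟩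

lemma loop_iff : ∀ (l : List Char) (cur : Nat), 97 ≤ cur → cur ≤ 121 →
    List.Pairwise (· ≤ ·) l →
    (∀ c ∈ l, 97 ≤ c.toNat → cur ≤ c.toNat) →
    (pyPangramLoop l cur (cur + 1) = true ↔ ('z' ∈ l ∧ chainP l cur))
  | [], cur, h1, h2, _, _ => by
      simp [pyPangramLoop]; omega
  | c :: rest, cur, h1, h2, hs, hinv => by
      obtain ⟨hhead, hrest⟩ := List.pairwise_cons.mp hs
      have hinvrest : ∀ d ∈ rest, 97 ≤ d.toNat → cur ≤ d.toNat :=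
        fun d hd h => hinv d (List.mem_cons_of_mem _ hd) h
      by_cases hc1 : c = Char.ofNat cur
      · have hctn : c.toNat = cur := by rw [hc1, toNat_ofNat_small (by omega)]
        rw [show pyPangramLoop (c :: rest) cur (cur + 1) = pyPangramLoop rest cur (cur + 1) by
              simp only [pyPangramLoop]; rw [if_pos hc1]]
        rw [loop_iff rest cur h1 h2 hrest hinvrest]
        exact (chain_cons_skip h1 h2 (by omega)).symm
      · by_cases hc2 : c = 'z'
        · rw [show pyPangramLoop (c :: rest) cur (cur + 1) = true by
                simp only [pyPangramLoop]; rw [if_neg hc1, if_pos hc2]]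
          subst hc2
          constructor
          · intro _
            refine ⟨List.mem_cons_self, ?_⟩
            intro e he h1' h2'
            rcases List.mem_cons.mp he with h | h
            · exfalso; subst h; rw [toNat_z] at h2'; omega
            · exfalso
              have hle : ('z' : Char) ≤ e := hhead e h
              have hle' : ('z' : Char).toNat ≤ e.toNat := hle
              rw [toNat_z] at hle'; omega
          · intro _; rfl
        · by_cases hc3 : c = Char.ofNat (cur + 1)
          · have hle : cur + 1 ≤ 121 := by
              by_contra hcon
              have hcur : cur = 121 := by omega
              apply hc2
              rw [hc3, hcur]
            have hctn : c.toNat = cur + 1 := by rw [hc3, toNat_ofNat_small (by omega)]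
            rw [show pyPangramLoop (c :: rest) cur (cur + 1) = pyPangramLoop rest (cur + 1) (cur + 1 + 1) by
                  simp only [pyPangramLoop]; rw [if_neg hc1, if_neg hc2, if_pos hc3]]
            rw [loop_iff rest (cur + 1) (by omega) hle hrest
                  (fun d hd _ => by
                    have hcd : c ≤ d := hhead d hd
                    have hcd' : c.toNat ≤ d.toNat := hcd
                    omega)]
            exact (chain_cons_adv h1 hctn hle).symm
          · by_cases hc4 : c.toNat < 97 ∨ 97 + 25 < c.toNat
            · have hctn : c.toNat ≠ cur ∧ c.toNat ≠ cur + 1 := by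
                constructor <;> omega
              rw [show pyPangramLoop (c :: rest) cur (cur + 1) = pyPangramLoop rest cur (cur + 1) by
                    simp only [pyPangramLoop]; rw [if_neg hc1, if_neg hc2, if_neg hc3, if_pos hc4]]
              rw [loop_iff rest cur h1 h2 hrest hinvrest]
              exact (chain_cons_skip (c := c) (rest := rest) h1 h2 (by omega)).symm
            · rw [show pyPangramLoop (c :: rest) cur (cur + 1) = false by
                    simp only [pyPangramLoop]; rw [if_neg hc1, if_neg hc2, if_neg hc3, if_neg hc4]]
              have hb : 97 ≤ c.toNat ∧ c.toNat ≤ 122 := by omega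
              have hne122 : c.toNat ≠ 122 := by
                intro h; exact hc2 (char_eq_of_toNat_eq (by rw [toNat_z]; exact h))
              have hnecur : c.toNat ≠ cur := by
                intro h; exact hc1 (char_eq_of_toNat_eq (by rw [toNat_ofNat_small (by omega)]; exact h))
              have hnecur1 : c.toNat ≠ cur + 1 := by
                intro h; exact hc3 (char_eq_of_toNat_eq (by rw [toNat_ofNat_small (by omega)]; exact h))
              have hcur_le : cur ≤ c.toNat := hinv c List.mem_cons_self (by omega)
              constructor
              · intro h; exact absurd h (by simp)
              · rintro ⟨_, hch⟩
                exfalso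
                obtain ⟨d, hd, hde⟩ := hch c List.mem_cons_self (by omega) (by omega)
                rcases List.mem_cons.mp hd with h | h
                · rw [h] at hde; omega
                · have hcd : c ≤ d := hhead d h
                  have hcd' : c.toNat ≤ d.toNat := hcd
                  omega

lemma A_iff (text : String) : is_pangram_1 text = true ↔
    (26 ≤ text.toList.length ∧ 'z' ∈ text.toList ∧
      ∀ c ∈ text.toList, 99 ≤ c.toNat → c.toNat ≤ 121 → Char.ofNat (c.toNat - 1) ∈ text.toList) := by
  unfold is_pangram_1
  rw [PySem.Str.len_eq]
  by_cases h26 : (text.toList.length : Int) < 26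
  · rw [if_pos h26]; constructor
    · intro h; exact absurd h (by simp)
    · rintro ⟨h, _⟩; exfalso; omega
  · rw [if_neg h26]
    have h26' : 26 ≤ text.toList.length := by omega
    have hs : List.Pairwise (· ≤ ·) (PySem.List.sorted text.toList (fun c => c) false) :=
      PySem.List.sorted_pairwise text.toList (fun c => c)
    rw [show (98 : Nat) = 97 + 1 from rfl,
        loop_iff _ 97 (by omega) (by omega) hs (fun c _ h => h)]
    unfold chainP
    simp only [PySem.List.mem_sorted]
    constructor
    · rintro ⟨hz, hch⟩
      refine ⟨h26', hz, ?_⟩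
      intro c hc h1 h2
      obtain ⟨d, hd, hde⟩ := hch c hc h1 h2
      have : Char.ofNat (c.toNat - 1) = d :=
        char_eq_of_toNat_eq (by rw [toNat_ofNat_small (by omega)]; omega)
      rw [this]; exact hd
    · rintro ⟨_, hz, hch⟩
      refine ⟨hz, ?_⟩
      intro c hc h1 h2
      exact ⟨Char.ofNat (c.toNat - 1), hch c hc h1 h2, by rw [toNat_ofNat_small (by omega)]; omega⟩

lemma B_iff (text : String) : is_pangram_1_alt text = true ↔
    ∀ c ∈ "abcdefghijklmnopqrstuvwxyz".toList, c ∈ text.toList := by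
  unfold is_pangram_1_alt
  simp only [List.all_eq_true, PySem.Set.contains_iff, PySem.Set.mem_ofList]

lemma alphaZ_toList : "abcdefghijklmnopqrstuvwxyz".toList = ['a','b','c','d','e','f','g','h','i','j','k','l','m','n','o','p','q','r','s','t','u','v','w','x','y','z'] := by simp

lemma alphaY_toList : "abcdefghijklmnopqrstuvwxy".toList = ['a','b','c','d','e','f','g','h','i','j','k','l','m','n','o','p','q','r','s','t','u','v','w','x','y'] := by simp

lemma wit_toList : pvDiffWitness_is_pangram_1.toList = ['z','z','z','z','z','z','z','z','z','z','z','z','z','z','z','z','z','z','z','z','z','z','z','z','z','z'] := by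
  simp [pvDiffWitness_is_pangram_1]

set_option maxRecDepth 100000 in
lemma ofNat_mem_alpha (n : Nat) (h1 : 97 ≤ n) (h2 : n ≤ 122) :
    Char.ofNat n ∈ "abcdefghijklmnopqrstuvwxyz".toList := by
  rw [alphaZ_toList]
  interval_cases n <;> decide

lemma alpha_split : ∀ c ∈ "abcdefghijklmnopqrstuvwxyz".toList,
    c = 'z' ∨ c ∈ "abcdefghijklmnopqrstuvwxy".toList := by
  intro c hc
  rw [alphaZ_toList] at hc
  rw [alphaY_toList]
  fin_cases hc <;> decide

-- ===== VERDICT (by name: the statement is the Claim_ definition above) =====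
set_option maxRecDepth 100000 in
theorem is_pangram_1_spec : Claim_unchanged_is_pangram_1 := by
  intro text _ hnD
  show is_pangram_1 text = is_pangram_1_alt text
  by_cases hfull : ∀ c ∈ "abcdefghijklmnopqrstuvwxyz".toList, c ∈ text.toList
  · have hB : is_pangram_1_alt text = true := (B_iff text).mpr hfull
    have hA : is_pangram_1 text = true := by
      refine (A_iff text).mpr ⟨?_, hfull 'z' (by rw [alphaZ_toList]; decide), ?_⟩
      · have hsub : "abcdefghijklmnopqrstuvwxyz".toList ⊆ text.toList := hfull
        have := (List.subperm_of_subset (by rw [alphaZ_toList]; decide) hsub).length_le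
        simpa using this
      · intro c _ h1 h2
        exact hfull (Char.ofNat (c.toNat - 1)) (ofNat_mem_alpha _ (by omega) (by omega))
    rw [hA, hB]
  · have hB : is_pangram_1_alt text = false := by
      rw [Bool.eq_false_iff]
      intro h; exact hfull ((B_iff text).mp h)
    have hA : is_pangram_1 text = false := by
      rw [Bool.eq_false_iff]
      intro h
      obtain ⟨h26, hz, hch⟩ := (A_iff text).mp h
      apply hnD
      refine ⟨h26, hz, hch, ?_⟩
      intro hay
      apply hfull
      intro c hc
      rcases alpha_split c hc with h | h
      · subst h; exact hz
      · exact hay c h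
    rw [hA, hB]

set_option maxRecDepth 100000 in
theorem is_pangram_1_changed : Claim_changed_is_pangram_1 := by
  unfold Claim_changed_is_pangram_1
  refine ⟨?_, ?_, ?_, ?_, by decide⟩
  · show pvDomStr pvDiffWitness_is_pangram_1 = true
    rw [pvDomStr, wit_toList]; decide
  · unfold D_is_pangram_1
    rw [wit_toList, alphaY_toList]
    refine ⟨by decide, by decide, ?_, ?_⟩
    · intro c hc
      fin_cases hc <;> decide
    · intro hall
      have := hall 'a' (by decide)
      exact absurd this (by decide)
  · show is_pangram_1 pvDiffWitness_is_pangram_1 = true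
    rw [is_pangram_1, PySem.Str.len_eq, wit_toList]; decide
  · show is_pangram_1_alt pvDiffWitness_is_pangram_1 = false
    rw [is_pangram_1_alt, wit_toList, alphaZ_toList]; decide

set_option maxRecDepth 100000 in
theorem is_pangram_1_tight : Claim_exact_is_pangram_1 := by
  intro text _ hD
  obtain ⟨h26, hz, hch, hnot⟩ := hD
  have hA : is_pangram_1 text = true := (A_iff text).mpr ⟨h26, hz, hch⟩
  have hB : is_pangram_1_alt text = false := by
    rw [Bool.eq_false_iff]
    intro h
    have hsub : ∀ c ∈ "abcdefghijklmnopqrstuvwxy".toList, c ∈ "abcdefghijklmnopqrstuvwxyz".toList := by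
      intro c hc
      rw [alphaY_toList] at hc
      rw [alphaZ_toList]
      fin_cases hc <;> decide
    exact hnot (fun c hc => (B_iff text).mp h c (hsub c hc))
  rw [hA, hB]; simp
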